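-- pv_equiv track=rewrite | github.com/MlvPrasadOfficial/SCALER_DSML_MAR_2022_SOLUTIONS_BY_MLV_PRASAD | Day008 - DSML Intermediate DSA Arrays - Prefix Sum/a03.py | solve
-- ===== SOURCE A (Python) =====
-- def solve(A, B):
--
--     n = len(A)
--     suff = [0] * (n + 1)
--     suff[n - 1] = A[n - 1]
--     for i in range(n - 2, -1, -1):
--         suff[i] = A[i] + suff[i + 1]
--     prefSum = 0
--     ans = suff[n - B]
--     for i in range(B):
--         prefSum = prefSum + A[i]
--         suffSum = suff[n - B + i + 1]
--         ans = max(ans, prefSum + suffSum)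
--     return ans
-- ===== SOURCE B (Python) =====
-- def solve(A, B):
--     n = len(A)
--     total = sum(A)
--     w = n - B
--     if w == 0:
--         return total
--     cur = sum(A[:w])
--     best = cur
--     for i in range(w, n):
--         cur = cur + A[i] - A[i - w]
--         best = min(best, cur)
--     return total - best
-- ===== Notes on version B (the rewrite author's own statement) =====
-- stated objective: alternative
-- what changed: Replaces the explicit suffix-sum array plus prefix-loop maximisation with total-sum minus a single sliding-window minimum over the n-B middle elements.
import Mathlib
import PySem

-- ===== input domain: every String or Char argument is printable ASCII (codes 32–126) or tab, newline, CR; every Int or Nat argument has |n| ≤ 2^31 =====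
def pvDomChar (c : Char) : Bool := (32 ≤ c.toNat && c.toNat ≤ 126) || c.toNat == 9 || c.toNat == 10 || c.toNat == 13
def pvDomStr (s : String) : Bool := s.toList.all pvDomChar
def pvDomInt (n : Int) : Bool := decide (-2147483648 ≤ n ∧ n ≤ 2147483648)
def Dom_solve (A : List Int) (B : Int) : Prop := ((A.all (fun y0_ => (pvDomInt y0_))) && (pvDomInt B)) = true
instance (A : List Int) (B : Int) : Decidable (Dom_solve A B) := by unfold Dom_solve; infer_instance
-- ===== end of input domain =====

-- B replaces A's suffix-sum array + prefix maximisation by total-sum minus a sliding-window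
-- minimum over the n-B middle elements (same O(n) time, O(1) extra space).

-- ===== PORT A =====
def solve (A : List Int) (B : Int) : Int :=
  let n : Int := (A.length : Int)
  let suff0 : List Int := List.replicate (A.length + 1) (0 : Int)
  let suff1 : List Int := PySem.List.pySetD suff0 (n - 1) (PySem.List.pyGetD A (n - 1) 0)
  let suff : List Int := (PySem.List.pyRange (n - 2) (-1) (-1)).foldl
    (fun s i => PySem.List.pySetD s i (PySem.List.pyGetD A i 0 + PySem.List.pyGetD s (i + 1) 0)) suff1
  let st : Int × Int := (PySem.List.pyRange 0 B 1).foldl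
    (fun st i =>
      let prefSum := st.1 + PySem.List.pyGetD A i 0
      let suffSum := PySem.List.pyGetD suff (n - B + i + 1) 0
      (prefSum, max st.2 (prefSum + suffSum)))
    (0, PySem.List.pyGetD suff (n - B) 0)
  st.2

-- ===== PORT B =====
def solve_alt (A : List Int) (B : Int) : Int :=
  let n : Int := (A.length : Int)
  let total : Int := A.sum
  let w : Int := n - B
  if w = 0 then total
  else
    let cur0 : Int := (PySem.List.slice A none (some w)).sum
    let st : Int × Int := (PySem.List.pyRange w n 1).foldl
      (fun st i =>
        let cur := st.1 + PySem.List.pyGetD A i 0 - PySem.List.pyGetD A (i - w) 0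
        (cur, min st.2 cur))
      (cur0, cur0)
    total - st.2

-- ===== PRECONDITION & SPEC =====
-- Pre excludes exactly the inputs where A raises IndexError: empty A (A[n-1]) and B outside [0, n]
-- (suff[n-B] or A[i] out of range).
def Pre_solve (A : List Int) (B : Int) : Prop := A ≠ [] ∧ 0 ≤ B ∧ B ≤ (A.length : Int)
instance (A : List Int) (B : Int) : Decidable (Pre_solve A B) := by unfold Pre_solve; infer_instance
def pvWitness_solve : List Int × Int := ([1, 2, 3], 2)

def Spec_solve (A : List Int) (B : Int) (out : Int) : Prop := out = solve_alt A B
instance (A : List Int) (B : Int) (out : Int) : Decidable (Spec_solve A B out) := by unfold Spec_solve; infer_instance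

-- ===== CLAIM (what is proved, stated in full; the proofs are below) =====
def Claim_equal_solve : Prop := ∀ (A : List Int) (B : Int), Dom_solve A B → Pre_solve A B → Spec_solve A B (solve A B)

-- ===== LEMMAS AND PROOFS =====

-- prefix / suffix sums and the two loop recurrences
def pvSfx (A : List Int) (j : Nat) : Int := (A.drop j).sum
def pvPfx (A : List Int) (k : Nat) : Int := (A.take k).sum
def pvMA (A : List Int) (b : Nat) : Nat → Int
  | 0 => pvSfx A (A.length - b)
  | m + 1 => max (pvMA A b m) (pvPfx A (m + 1) + pvSfx A (A.length - b + (m + 1)))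
def pvNB (A : List Int) (w : Nat) : Nat → Int
  | 0 => pvPfx A w
  | m + 1 => min (pvNB A w m) (pvPfx A (m + 1 + w) - pvPfx A (m + 1))

theorem pvPfx_add_sfx (A : List Int) (k : Nat) : pvPfx A k + pvSfx A k = A.sum := by
  unfold pvPfx pvSfx
  rw [← List.sum_append, List.take_append_drop]

theorem pvSfx_succ (A : List Int) (j : Nat) (h : j < A.length) :
    pvSfx A j = A.getD j 0 + pvSfx A (j + 1) := by
  unfold pvSfx
  rw [List.sum_drop_succ A j h]
  simp [List.getD_eq_getElem?_getD, List.getElem?_eq_getElem h]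

theorem pvPfx_succ (A : List Int) (m : Nat) (h : m < A.length) :
    pvPfx A (m + 1) = pvPfx A m + A.getD m 0 := by
  unfold pvPfx
  rw [List.sum_take_succ A m h]
  simp [List.getD_eq_getElem?_getD, List.getElem?_eq_getElem h]

theorem pv_getD_set_self (s : List Int) (i : Nat) (v : Int) (h : i < s.length) :
    (s.set i v).getD i 0 = v := by
  simp [List.getD_eq_getElem?_getD, h]

theorem pv_getD_set_ne (s : List Int) (i j : Nat) (v : Int) (h : i ≠ j) :
    (s.set i v).getD j 0 = s.getD j 0 := by
  simp [List.getD_eq_getElem?_getD, h]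

-- the suffix-array loop of A fills suff[j] with the suffix sums
theorem pvSuffLoop (A : List Int) : ∀ (m : Nat) (a : Int) (s : List Int),
    a < (m : Int) → a ≤ (A.length : Int) - 1 → s.length = A.length + 1 →
    (∀ j : Nat, a < (j : Int) → j ≤ A.length → s.getD j 0 = pvSfx A j) →
    ∀ j : Nat, j ≤ A.length →
      ((PySem.List.pyRange a (-1) (-1)).foldl
        (fun s i => PySem.List.pySetD s i (PySem.List.pyGetD A i 0 + PySem.List.pyGetD s (i + 1) 0)) s).getD j 0
        = pvSfx A j := by
  intro m
  induction m with
  | zero =>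
    intro a s ha _ _ hs j hj
    rw [PySem.List.pyRange_neg_one_eq_nil (by omega : a ≤ -1)]
    simpa using hs j (by omega) hj
  | succ m ih =>
    intro a s ha hle hlen hs j hj
    by_cases h0 : a < 0
    · rw [PySem.List.pyRange_neg_one_eq_nil (by omega : a ≤ -1)]
      simpa using hs j (by omega) hj
    · rw [PySem.List.pyRange_neg_one_cons (by omega : (-1 : Int) < a), List.foldl_cons]
      refine ih (a - 1) _ (by omega) (by omega) ?_ ?_ j hj
      · rw [PySem.List.length_pySetD]; exact hlen
      · intro j' hj1 hj2
        by_cases he : j' = a.toNat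
        · rw [show a = ((j' : Nat) : Int) by omega, PySem.List.pySetD_natCast,
            PySem.List.pyGetD_natCast,
            show ((j' : Nat) : Int) + 1 = ((j' + 1 : Nat) : Int) by omega,
            PySem.List.pyGetD_natCast,
            pv_getD_set_self _ _ _ (by omega),
            hs (j' + 1) (by omega) (by omega), ← pvSfx_succ A j' (by omega)]
        · rw [show a = ((a.toNat : Nat) : Int) by omega, PySem.List.pySetD_natCast,
            pv_getD_set_ne _ _ _ _ (fun hh => he hh.symm)]
          exact hs j' (by omega) hj2

-- A's answer loop computes the recurrence pvMA
theorem pvALoop (A : List Int) (suff : List Int) (b : Nat) (hb : b ≤ A.length)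
    (hsuff : ∀ j : Nat, j ≤ A.length → suff.getD j 0 = pvSfx A j) :
    ∀ m : Nat, m ≤ b →
      (List.range m).foldl
        (fun (st : Int × Int) (k : Nat) =>
          let prefSum := st.1 + PySem.List.pyGetD A (k : Int) 0
          let suffSum := PySem.List.pyGetD suff ((A.length : Int) - (b : Int) + (k : Int) + 1) 0
          (prefSum, max st.2 (prefSum + suffSum)))
        (0, PySem.List.pyGetD suff ((A.length : Int) - (b : Int)) 0)
      = (pvPfx A m, pvMA A b m) := by
  intro m
  induction m with
  | zero =>
    intro _
    simp only [List.range_zero, List.foldl_nil, pvMA]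
    rw [show ((A.length : Int) - (b : Int)) = ((A.length - b : Nat) : Int) by omega,
      PySem.List.pyGetD_natCast, hsuff (A.length - b) (by omega)]
    simp [pvPfx]
  | succ m ih =>
    intro hm
    rw [List.range_succ, List.foldl_append, ih (by omega)]
    simp only [List.foldl_cons, List.foldl_nil]
    rw [show ((m : Nat) : Int) = ((m : Nat) : Int) from rfl, PySem.List.pyGetD_natCast,
      ← pvPfx_succ A m (by omega),
      show ((A.length : Int) - (b : Int) + (m : Int) + 1) = ((A.length - b + (m + 1) : Nat) : Int) by omega,
      PySem.List.pyGetD_natCast, hsuff (A.length - b + (m + 1)) (by omega)]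
    simp only [pvMA]

-- B's sliding-window loop computes the recurrence pvNB
theorem pvBLoop (A : List Int) (w b : Nat) (hwb : w + b = A.length) :
    ∀ m : Nat, m ≤ b →
      (List.range m).foldl
        (fun (st : Int × Int) (k : Nat) =>
          let cur := st.1 + PySem.List.pyGetD A ((w : Int) + (k : Int)) 0
                          - PySem.List.pyGetD A ((w : Int) + (k : Int) - (w : Int)) 0
          (cur, min st.2 cur))
        (pvPfx A w, pvPfx A w)
      = (pvPfx A (m + w) - pvPfx A m, pvNB A w m) := by
  intro m
  induction m with
  | zero =>
    intro _
    simp only [List.range_zero, List.foldl_nil, pvNB]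
    simp [pvPfx]
  | succ m ih =>
    intro hm
    rw [List.range_succ, List.foldl_append, ih (by omega)]
    simp only [List.foldl_cons, List.foldl_nil]
    have e1 : PySem.List.pyGetD A ((w : Int) + (m : Int)) 0 = A.getD (m + w) 0 := by
      rw [show ((w : Int) + (m : Int)) = ((m + w : Nat) : Int) by omega, PySem.List.pyGetD_natCast]
    have e2 : PySem.List.pyGetD A ((w : Int) + (m : Int) - (w : Int)) 0 = A.getD m 0 := by
      rw [show ((w : Int) + (m : Int) - (w : Int)) = ((m : Nat) : Int) by omega, PySem.List.pyGetD_natCast]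
    have hp1 : pvPfx A (m + 1 + w) = pvPfx A (m + w) + A.getD (m + w) 0 := by
      rw [show m + 1 + w = (m + w) + 1 by omega, pvPfx_succ A (m + w) (by omega)]
    have hp2 : pvPfx A (m + 1) = pvPfx A m + A.getD m 0 := pvPfx_succ A m (by omega)
    simp only [pvNB]
    rw [e1, e2, hp1, hp2]
    have key : pvPfx A (m + w) - pvPfx A m + A.getD (m + w) 0 - A.getD m 0
        = pvPfx A (m + w) + A.getD (m + w) 0 - (pvPfx A m + A.getD m 0) := by ring
    rw [key]

-- duality: total minus the window minimum is the prefix+suffix maximum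
theorem pvDual (A : List Int) (w b : Nat) (hwb : w + b = A.length) :
    ∀ m : Nat, A.sum - pvNB A w m = pvMA A b m := by
  intro m
  induction m with
  | zero =>
    simp only [pvNB, pvMA]
    rw [show A.length - b = w by omega]
    linarith [pvPfx_add_sfx A w]
  | succ m ih =>
    simp only [pvNB, pvMA]
    rw [show A.length - b + (m + 1) = m + 1 + w by omega]
    have h2 : A.sum - (pvPfx A (m + 1 + w) - pvPfx A (m + 1)) = pvPfx A (m + 1) + pvSfx A (m + 1 + w) := by
      linarith [pvPfx_add_sfx A (m + 1 + w)]
    rcases le_total (pvNB A w m) (pvPfx A (m + 1 + w) - pvPfx A (m + 1)) with hc | hc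
    · rw [min_eq_left hc, ih, ← ih, ← h2, max_eq_left (by linarith)]
    · rw [min_eq_right hc, h2, ← ih, max_eq_right (by linarith [h2])]

theorem pvMA_top (A : List Int) : ∀ m : Nat, pvMA A A.length m = A.sum := by
  intro m
  induction m with
  | zero =>
    simp only [pvMA]
    rw [Nat.sub_self]
    simp [pvSfx]
  | succ m ih =>
    simp only [pvMA]
    rw [ih, Nat.sub_self, show (0 : Nat) + (m + 1) = m + 1 by omega, pvPfx_add_sfx]
    exact max_self _

theorem pv_solve_eq (A : List Int) (B : Int) (h : Pre_solve A B) :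
    solve A B = pvMA A B.toNat B.toNat := by
  obtain ⟨hne, hB0, hBn⟩ := h
  have hA1 : 1 ≤ A.length := List.length_pos_of_ne_nil hne
  obtain ⟨b, hb⟩ : ∃ b : Nat, B = (b : Int) := ⟨B.toNat, by omega⟩
  subst hb
  simp only [Int.toNat_natCast]
  have hbn : b ≤ A.length := by omega
  simp only [solve]
  have hinit : ∀ j : Nat, (A.length : Int) - 2 < j → j ≤ A.length →
      (PySem.List.pySetD (List.replicate (A.length + 1) (0 : Int)) ((A.length : Int) - 1)
        (PySem.List.pyGetD A ((A.length : Int) - 1) 0)).getD j 0 = pvSfx A j := by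
    intro j h1 h2
    rw [show ((A.length : Int) - 1) = ((A.length - 1 : Nat) : Int) by omega,
      PySem.List.pySetD_natCast, PySem.List.pyGetD_natCast]
    by_cases hj : j = A.length - 1
    · subst hj
      rw [pv_getD_set_self _ _ _ (by simp)]
      have hz : pvSfx A ((A.length - 1) + 1) = 0 := by
        simp [pvSfx, show A.length - 1 + 1 = A.length by omega]
      rw [pvSfx_succ A (A.length - 1) (by omega), hz, add_zero]
    · have hj' : j = A.length := by omega
      subst hj'
      rw [pv_getD_set_ne _ _ _ _ (by omega)]
      simp [pvSfx, List.getD_eq_getElem?_getD]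
  have hsuff : ∀ j : Nat, j ≤ A.length →
      ((PySem.List.pyRange ((A.length : Int) - 2) (-1) (-1)).foldl
        (fun s i => PySem.List.pySetD s i (PySem.List.pyGetD A i 0 + PySem.List.pyGetD s (i + 1) 0))
        (PySem.List.pySetD (List.replicate (A.length + 1) (0 : Int)) ((A.length : Int) - 1)
          (PySem.List.pyGetD A ((A.length : Int) - 1) 0))).getD j 0 = pvSfx A j := by
    intro j hj
    exact pvSuffLoop A A.length ((A.length : Int) - 2) _ (by omega) (by omega)
      (by rw [PySem.List.length_pySetD]; simp) hinit j hj
  rw [PySem.List.pyRange_zero_natCast]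
  simp only [List.foldl_map]
  rw [pvALoop A _ b hbn hsuff b le_rfl]

theorem pv_solve_alt_eq (A : List Int) (B : Int) (h : Pre_solve A B) :
    solve_alt A B = pvMA A B.toNat B.toNat := by
  obtain ⟨hne, hB0, hBn⟩ := h
  have hA1 : 1 ≤ A.length := List.length_pos_of_ne_nil hne
  obtain ⟨b, hb⟩ : ∃ b : Nat, B = (b : Int) := ⟨B.toNat, by omega⟩
  subst hb
  simp only [Int.toNat_natCast]
  simp only [solve_alt]
  by_cases hw : (A.length : Int) - (b : Int) = 0
  · rw [if_pos hw, show b = A.length by omega]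
    exact (pvMA_top A A.length).symm
  · rw [if_neg hw]
    have hwb : (A.length - b) + b = A.length := by omega
    rw [show ((A.length : Int) - (b : Int)) = ((A.length - b : Nat) : Int) by omega,
      PySem.List.slice_to_natCast, PySem.List.pyRange_one,
      show (((A.length : Nat) : Int) - ((A.length - b : Nat) : Int)).toNat = b by omega]
    simp only [List.foldl_map]
    have hc0 : (A.take (A.length - b)).sum = pvPfx A (A.length - b) := rfl
    rw [hc0, pvBLoop A (A.length - b) b hwb b le_rfl]
    exact pvDual A (A.length - b) b hwb b

-- ===== VERDICT =====
theorem solve_spec : Claim_equal_solve := by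
  intro A B _ hpre
  unfold Spec_solve
  rw [pv_solve_eq A B hpre, pv_solve_alt_eq A B hpre]
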